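-- pv_equiv track=rewrite | github.com/internalforces/codingchallenges | Python3/프로그래머스/1/340198. ［PCCE 기출문제］ 10번 ／ 공원/［PCCE 기출문제］ 10번 ／ 공원.py | solution
-- ===== SOURCE A (Python) =====
-- def solution(mats, park):
--     n = len(park)
--     m = len(park[0]) if n > 0 else 0
--
--     dp = [[0] * m for _ in range(n)]
--     answer = 0
--
--     for i in range(n):
--         for j in range(m):
--             if park[i][j] == "-1":
--                 if i == 0 or j == 0:
--                     dp[i][j] = 1
--                 else:
--                     dp[i][j] = min(dp[i-1][j], dp[i][j-1], dp[i-1][j-1]) + 1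
--
--                 if dp[i][j] in mats and dp[i][j] > answer:
--                     answer = dp[i][j]
--             if answer == 0:
--                 answer = -1
--     return answer
-- ===== SOURCE B (Python) =====
-- def solution(mats, park):
--     # Rolling-row maximal-square DP tracking only the global best side,
--     # then a separate pass picking the largest mat size that fits.
--     n = len(park)
--     if n == 0:
--         return 0
--     m = len(park[0])
--     if m == 0:
--         return 0
--     best = 0
--     prev = [0] * m
--     for row in park:
--         cur = [0] * m
--         for j in range(m):
--             if row[j] == "-1":
--                 v = 1 if j == 0 else min(prev[j], cur[j - 1], prev[j - 1]) + 1
--                 cur[j] = v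
--                 if v > best:
--                     best = v
--         prev = cur
--     ans = -1
--     for s in mats:
--         if 1 <= s <= best and s > ans:
--             ans = s
--     return ans
-- ===== Notes on version B (the rewrite author's own statement) =====
-- stated objective: alternative
-- what changed: B replaces A's full n*m DP table with interleaved 'in mats' membership checks and the per-cell answer==0->-1 reset by a rolling one-row DP that tracks only the global maximal square side, followed by a separate pass over mats picking the largest size s with 1<=s<=best (valid because every side 1..best is achieved).
import Mathlib
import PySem

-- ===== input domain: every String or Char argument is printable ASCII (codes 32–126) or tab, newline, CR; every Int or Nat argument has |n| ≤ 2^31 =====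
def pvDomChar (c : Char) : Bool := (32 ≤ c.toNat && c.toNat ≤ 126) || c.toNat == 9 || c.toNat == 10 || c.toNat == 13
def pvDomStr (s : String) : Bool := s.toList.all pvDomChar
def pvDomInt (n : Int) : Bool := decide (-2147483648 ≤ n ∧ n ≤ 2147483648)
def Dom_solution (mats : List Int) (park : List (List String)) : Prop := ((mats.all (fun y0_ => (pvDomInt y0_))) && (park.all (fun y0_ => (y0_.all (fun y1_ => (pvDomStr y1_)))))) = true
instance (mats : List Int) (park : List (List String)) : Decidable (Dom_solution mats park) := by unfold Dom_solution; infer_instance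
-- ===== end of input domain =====

-- B replaces A's full DP table + interleaved `in mats` checks by a rolling-row DP tracking only the
-- global best side, then a separate pass over mats (alternative decomposition; equal return values).

-- ===== PORT A =====
-- Indexing: under Pre_solution every index read is in range, so `List.getD` is exact for Python's
-- park[i][j] / dp[i][j] there.
def pvTset (dp : List (List Int)) (a b : Nat) (v : Int) : List (List Int) :=
  dp.set a ((dp.getD a []).set b v)

def pvTget (dp : List (List Int)) (a b : Nat) : Int :=
  (dp.getD a []).getD b 0

-- body of A's inner loop at cell (i, j): state = (dp, answer)
def stepA (mats : List Int) (park : List (List String)) (i j : Nat)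
    (st : List (List Int) × Int) : List (List Int) × Int :=
  let st1 : List (List Int) × Int :=
    if (park.getD i []).getD j "" = "-1" then
      let v : Int :=
        if i = 0 ∨ j = 0 then 1
        else min (min (pvTget st.1 (i-1) j) (pvTget st.1 i (j-1))) (pvTget st.1 (i-1) (j-1)) + 1
      (pvTset st.1 i j v, if v ∈ mats ∧ v > st.2 then v else st.2)
    else st
  (st1.1, if st1.2 = 0 then -1 else st1.2)

def rowA (mats : List Int) (park : List (List String)) (m : Nat) (i : Nat)
    (st : List (List Int) × Int) : List (List Int) × Int :=
  (List.range m).foldl (fun st j => stepA mats park i j st) st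

def solution (mats : List Int) (park : List (List String)) : Int :=
  let n := park.length
  let m := match park with | [] => 0 | r :: _ => r.length
  ((List.range n).foldl (fun st i => rowA mats park m i st)
    (List.replicate n (List.replicate m (0:Int)), 0)).2

-- ===== PORT B =====
-- body of B's inner loop at column j; prev = previous dp row, state = (cur, best)
def stepB (prev : List Int) (row : List String) (j : Nat)
    (st2 : List Int × Int) : List Int × Int :=
  if row.getD j "" = "-1" then
    let v : Int :=
      if j = 0 then 1
      else min (min (prev.getD j 0) (st2.1.getD (j-1) 0)) (prev.getD (j-1) 0) + 1
    (st2.1.set j v, if v > st2.2 then v else st2.2)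
  else st2

def rowB (m : Nat) (row : List String) (st : List Int × Int) : List Int × Int :=
  (List.range m).foldl (fun st2 j => stepB st.1 row j st2) (List.replicate m 0, st.2)

def solution_alt (mats : List Int) (park : List (List String)) : Int :=
  match park with
  | [] => 0
  | r0 :: _ =>
    let m := r0.length
    if m = 0 then 0
    else
      let best := (park.foldl (fun st row => rowB m row st) (List.replicate m 0, 0)).2
      mats.foldl (fun a s => if 1 ≤ s ∧ s ≤ best ∧ s > a then s else a) (-1)

-- ===== PRECONDITION & SPEC =====
-- Pre_ excludes exactly the ragged grids on which Python A raises IndexError: some row shorter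
-- than the first row (A reads park[i][j] for every j < len(park[0])).
def Pre_solution (mats : List Int) (park : List (List String)) : Prop :=
  ∀ r ∈ park, (park.headD []).length ≤ r.length

instance (mats : List Int) (park : List (List String)) : Decidable (Pre_solution mats park) := by
  unfold Pre_solution; infer_instance

def pvWitness_solution : List Int × List (List String) :=
  ([1, 2], [["-1", "-1"], ["-1", "-1"]])

def Spec_solution (mats : List Int) (park : List (List String)) (out : Int) : Prop := out = solution_alt mats park
instance (mats : List Int) (park : List (List String)) (out : Int) : Decidable (Spec_solution mats park out) := by unfold Spec_solution; infer_instance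

-- ===== CLAIM (what is proved, stated in full; the proofs are below) =====
def Claim_equal_solution : Prop := ∀ (mats : List Int) (park : List (List String)), Dom_solution mats park → Pre_solution mats park → Spec_solution mats park (solution mats park)

-- ===== LEMMAS AND PROOFS =====

-- the virtual grid both ports read (getD-based, total)
def pcell (park : List (List String)) (i j : Nat) : String :=
  (park.getD i []).getD j ""

-- the maximal-square dp value of cell (i, j)
def dpv (park : List (List String)) : Nat → Nat → Int
  | 0, j => if pcell park 0 j = "-1" then 1 else 0
  | i+1, 0 => if pcell park (i+1) 0 = "-1" then 1 else 0
  | i+1, j+1 =>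
    if pcell park (i+1) (j+1) = "-1" then
      min (min (dpv park i (j+1)) (dpv park (i+1) j)) (dpv park i j) + 1
    else 0
termination_by i j => i + j

lemma dpv_eq (park : List (List String)) (i j : Nat) :
    dpv park i j =
      if pcell park i j = "-1" then
        if i = 0 ∨ j = 0 then 1
        else min (min (dpv park (i-1) j) (dpv park i (j-1))) (dpv park (i-1) (j-1)) + 1
      else 0 := by
  rcases i with _ | i <;> rcases j with _ | j <;> simp [dpv]

lemma dpv_nonneg (park : List (List String)) (i j : Nat) : 0 ≤ dpv park i j := by
  have H : ∀ t i j, i + j ≤ t → 0 ≤ dpv park i j := by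
    intro t
    induction t with
    | zero =>
      intro i j h
      obtain ⟨rfl, rfl⟩ : i = 0 ∧ j = 0 := by omega
      rw [dpv]; split <;> omega
    | succ t ih =>
      intro i j h
      rcases i with _ | i <;> rcases j with _ | j
      · rw [dpv]; split <;> omega
      · rw [dpv]; split <;> omega
      · rw [dpv]; split <;> omega
      · rw [dpv]
        split
        · have h1 := ih i (j+1) (by omega)
          have h2 := ih (i+1) j (by omega)
          have h3 := ih i j (by omega)
          omega
        · omega
  exact H (i + j) i j le_rfl

lemma dpv_pos (park : List (List String)) (i j : Nat) (h : pcell park i j = "-1") :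
    1 ≤ dpv park i j := by
  rw [dpv_eq, if_pos h]
  split
  · omega
  · have h1 := dpv_nonneg park (i-1) j
    have h2 := dpv_nonneg park i (j-1)
    have h3 := dpv_nonneg park (i-1) (j-1)
    omega

lemma dpv_zero (park : List (List String)) (i j : Nat) (h : ¬ pcell park i j = "-1") :
    dpv park i j = 0 := by
  rw [dpv_eq, if_neg h]

lemma filled_of_dpv_pos (park : List (List String)) (i j : Nat) (h : 1 ≤ dpv park i j) :
    pcell park i j = "-1" := by
  by_contra hc
  rw [dpv_zero park i j hc] at h
  omega

-- s is the side of some maximal square in the n×m grid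
def Ach (park : List (List String)) (n m : Nat) (s : Int) : Prop :=
  ∃ i j, i < n ∧ j < m ∧ pcell park i j = "-1" ∧ dpv park i j = s

-- ------- generic max-fold lemmas -------
def mfold {α : Type} (c : α → Prop) [DecidablePred c] (f : α → Int) (L : List α) (w : Int) : Int :=
  L.foldl (fun w x => if c x then max w (f x) else w) w

lemma mfold_lower {α : Type} (c : α → Prop) [DecidablePred c] (f : α → Int) :
    ∀ (L : List α) (w : Int), w ≤ mfold c f L w := by
  intro L
  induction L with
  | nil => intro w; simp [mfold]
  | cons x t ih =>
    intro w
    simp only [mfold, List.foldl]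
    refine le_trans ?_ (ih _)
    split <;> simp
lemma mfold_bound {α : Type} (c : α → Prop) [DecidablePred c] (f : α → Int) :
    ∀ (L : List α) (w : Int) (x : α), x ∈ L → c x → f x ≤ mfold c f L w := by
  intro L
  induction L with
  | nil => intro w x hx; simp at hx
  | cons y t ih =>
    intro w x hx hc
    rcases List.mem_cons.1 hx with rfl | hx
    · simp only [mfold, List.foldl, if_pos hc]
      exact le_trans (le_max_right _ _) (mfold_lower c f t _)
    · exact ih _ x hx hc

lemma mfold_cases {α : Type} (c : α → Prop) [DecidablePred c] (f : α → Int) :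
    ∀ (L : List α) (w : Int), mfold c f L w = w ∨ ∃ x ∈ L, c x ∧ mfold c f L w = f x := by
  intro L
  induction L with
  | nil => intro w; left; simp [mfold]
  | cons y t ih =>
    intro w
    have hstep : mfold c f (y :: t) w = mfold c f t (if c y then max w (f y) else w) := rfl
    by_cases hc : c y
    · rw [hstep, if_pos hc]
      rcases ih (max w (f y)) with h | ⟨x, hx, hcx, hval⟩
      · rcases max_choice w (f y) with hm | hm
        · left; rw [h, hm]
        · right; exact ⟨y, List.mem_cons_self, hc, by rw [h, hm]⟩
      · right; exact ⟨x, List.mem_cons_of_mem _ hx, hcx, hval⟩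
    · rw [hstep, if_neg hc]
      rcases ih w with h | ⟨x, hx, hcx, hval⟩
      · left; exact h
      · right; exact ⟨x, List.mem_cons_of_mem _ hx, hcx, hval⟩

-- ------- the -1 encoding -------
def encI (w : Int) : Int := if w = 0 then -1 else w

-- generic loop-body shapes of A's answer update (with the answer==0 → -1 renorm) and B's mats pass
def gstepR (c : Prop) [Decidable c] (v a : Int) : Int :=
  if (if c ∧ v > a then v else a) = 0 then -1 else (if c ∧ v > a then v else a)

def gstepP (c : Prop) [Decidable c] (v a : Int) : Int :=
  if c ∧ v > a then v else a

lemma gstepR_enc (c : Prop) [Decidable c] (v w : Int) (hv : c → 1 ≤ v) (hw : 0 ≤ w) :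
    gstepR c v (encI w) = encI (if c then max w v else w) := by
  by_cases hc : c
  · have hv1 := hv hc
    simp only [gstepR, encI, hc, true_and, if_pos hc, max_def]
    split_ifs <;> omega
  · simp only [gstepR, encI, hc, false_and, if_false, if_neg hc]
    split_ifs <;> omega

lemma gstepP_enc (c : Prop) [Decidable c] (v w : Int) (hv : c → 1 ≤ v) (hw : 0 ≤ w) :
    gstepP c v (encI w) = encI (if c then max w v else w) := by
  by_cases hc : c
  · have hv1 := hv hc
    simp only [gstepP, encI, hc, true_and, if_pos hc, max_def]
    split_ifs <;> omega
  · simp only [gstepP, encI, hc, false_and, if_false, if_neg hc]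

lemma enc_fold_renorm {α : Type} (c : α → Prop) [DecidablePred c] (f : α → Int)
    (hf : ∀ x, c x → 1 ≤ f x) :
    ∀ (L : List α) (w : Int), 0 ≤ w →
      L.foldl (fun a x => gstepR (c x) (f x) a) (encI w) = encI (mfold c f L w) := by
  intro L
  induction L with
  | nil => intro w _; simp [mfold]
  | cons x t ih =>
    intro w hw
    have h1 : (x :: t).foldl (fun a x => gstepR (c x) (f x) a) (encI w)
        = t.foldl (fun a x => gstepR (c x) (f x) a) (gstepR (c x) (f x) (encI w)) := rfl
    have h2 : mfold c f (x :: t) w = mfold c f t (if c x then max w (f x) else w) := rfl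
    rw [h1, h2, gstepR_enc (c x) (f x) w (hf x) hw]
    exact ih _ (by rcases max_choice w (f x) with h | h <;> split_ifs <;>
      first | omega | (have := hf x ‹c x›; omega))

lemma enc_fold_plain {α : Type} (c : α → Prop) [DecidablePred c] (f : α → Int)
    (hf : ∀ x, c x → 1 ≤ f x) :
    ∀ (L : List α) (w : Int), 0 ≤ w →
      L.foldl (fun a x => gstepP (c x) (f x) a) (encI w) = encI (mfold c f L w) := by
  intro L
  induction L with
  | nil => intro w _; simp [mfold]
  | cons x t ih =>
    intro w hw
    have h1 : (x :: t).foldl (fun a x => gstepP (c x) (f x) a) (encI w)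
        = t.foldl (fun a x => gstepP (c x) (f x) a) (gstepP (c x) (f x) (encI w)) := rfl
    have h2 : mfold c f (x :: t) w = mfold c f t (if c x then max w (f x) else w) := rfl
    rw [h1, h2, gstepP_enc (c x) (f x) w (hf x) hw]
    exact ih _ (by rcases max_choice w (f x) with h | h <;> split_ifs <;>
      first | omega | (have := hf x ‹c x›; omega))

-- ------- cells list -------
def cells (n m : Nat) : List (Nat × Nat) :=
  (List.range n).flatMap (fun i => (List.range m).map (fun j => (i, j)))

lemma mem_cells (n m : Nat) (p : Nat × Nat) : p ∈ cells n m ↔ p.1 < n ∧ p.2 < m := by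
  rcases p with ⟨i, j⟩
  simp [cells]

lemma foldl_flatMap {α β σ : Type} (g : α → List β) (f : σ → β → σ) :
    ∀ (L : List α) (s : σ), (L.flatMap g).foldl f s = L.foldl (fun s x => (g x).foldl f s) s := by
  intro L
  induction L with
  | nil => intro s; simp
  | cons x t ih => intro s; simp [List.flatMap_cons, List.foldl_append, ih]

-- ------- table invariant for A -------
def InvA (park : List (List String)) (n m : Nat) (dp : List (List Int)) (i j : Nat) : Prop :=
  dp.length = n ∧ (∀ a, a < n → (dp.getD a []).length = m) ∧
  ∀ a b, pvTget dp a b =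
    if (a < i ∨ (a = i ∧ b < j)) ∧ a < n ∧ b < m then dpv park a b else 0

-- pure answer step of A at cell (i, j)
def pstepA (mats : List Int) (park : List (List String)) (i j : Nat) (a : Int) : Int :=
  let a1 := if (pcell park i j = "-1" ∧ dpv park i j ∈ mats) ∧ dpv park i j > a
    then dpv park i j else a
  if a1 = 0 then -1 else a1

lemma pstepA_filled (mats : List Int) (park : List (List String)) (i j : Nat) (a : Int)
    (h : pcell park i j = "-1") :
    pstepA mats park i j a =
      (if (if dpv park i j ∈ mats ∧ dpv park i j > a then dpv park i j else a) = 0 then -1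
       else (if dpv park i j ∈ mats ∧ dpv park i j > a then dpv park i j else a)) := by
  simp [pstepA, h]

lemma pstepA_unfilled (mats : List Int) (park : List (List String)) (i j : Nat) (a : Int)
    (h : ¬ pcell park i j = "-1") :
    pstepA mats park i j a = if a = 0 then -1 else a := by
  simp [pstepA, h]

lemma InvA_init (park : List (List String)) (n m : Nat) :
    InvA park n m (List.replicate n (List.replicate m 0)) 0 0 := by
  refine ⟨by simp, fun a ha => by simp [List.getD, List.getElem?_replicate, ha], ?_⟩
  intro a b
  rw [if_neg (by omega)]
  by_cases ha : a < n
  · simp [pvTget, List.getD, List.getElem?_replicate, ha]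
    by_cases hb : b < m <;> simp [List.getElem?_replicate, hb]
  · simp [pvTget, List.getD, List.getElem?_replicate, ha]

lemma getD_set_eq {α : Type} (l : List α) (n : Nat) (x d : α) (h : n < l.length) :
    (l.set n x).getD n d = x := by
  simp [List.getD, List.getElem?_set_self', List.getElem?_eq_getElem h]

lemma getD_set_ne {α : Type} (l : List α) (n k : Nat) (x d : α) (h : k ≠ n) :
    (l.set n x).getD k d = l.getD k d := by
  simp only [List.getD]
  rw [List.getElem?_set_ne (by omega)]

lemma stepA_inv (mats : List Int) (park : List (List String)) (n m : Nat)
    (dp : List (List Int)) (ans : Int) (i j : Nat) (hi : i < n) (hj : j < m)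
    (hInv : InvA park n m dp i j) :
    stepA mats park i j (dp, ans) =
      ((stepA mats park i j (dp, ans)).1, pstepA mats park i j ans) ∧
    InvA park n m (stepA mats park i j (dp, ans)).1 i (j+1) := by
  obtain ⟨hlen, hrowlen, htg⟩ := hInv
  by_cases hfill : (park.getD i []).getD j "" = "-1"
  · have hfill' : pcell park i j = "-1" := hfill
    have hveq : (if i = 0 ∨ j = 0 then (1:Int)
        else min (min (pvTget dp (i-1) j) (pvTget dp i (j-1))) (pvTget dp (i-1) (j-1)) + 1)
        = dpv park i j := by
      rw [dpv_eq park i j, if_pos hfill']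
      by_cases hz : i = 0 ∨ j = 0
      · rw [if_pos hz, if_pos hz]
      · rw [if_neg hz, if_neg hz]
        have e1 : pvTget dp (i-1) j = dpv park (i-1) j := by
          rw [htg]; exact if_pos ⟨Or.inl (by omega), by omega, hj⟩
        have e2 : pvTget dp i (j-1) = dpv park i (j-1) := by
          rw [htg]; exact if_pos ⟨Or.inr ⟨rfl, by omega⟩, by omega, by omega⟩
        have e3 : pvTget dp (i-1) (j-1) = dpv park (i-1) (j-1) := by
          rw [htg]; exact if_pos ⟨Or.inl (by omega), by omega, by omega⟩
        rw [e1, e2, e3]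
    have hstep : stepA mats park i j (dp, ans) =
        (pvTset dp i j (dpv park i j),
         if (if dpv park i j ∈ mats ∧ dpv park i j > ans then dpv park i j else ans) = 0 then -1
         else (if dpv park i j ∈ mats ∧ dpv park i j > ans then dpv park i j else ans)) := by
      simp only [stepA, if_pos hfill, hveq]
    constructor
    · rw [hstep]
      refine Prod.ext rfl ?_
      rw [pstepA_filled mats park i j ans hfill']
    · rw [hstep]
      have hidp : i < dp.length := by omega
      have hjrow : j < (dp.getD i []).length := by rw [hrowlen i hi]; omega
      refine ⟨by simp [pvTset, hlen], ?_, ?_⟩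
      · intro a ha
        by_cases hai : a = i
        · subst hai
          rw [pvTset, getD_set_eq _ _ _ _ hidp, List.length_set]
          exact hrowlen a ha
        · rw [pvTset, getD_set_ne _ _ _ _ _ hai]
          exact hrowlen a ha
      · intro a b
        by_cases hab : a = i ∧ b = j
        · obtain ⟨rfl, rfl⟩ := hab
          rw [pvTget, pvTset, getD_set_eq _ _ _ _ hidp, getD_set_eq _ _ _ _ hjrow]
          rw [if_pos ⟨Or.inr ⟨rfl, by omega⟩, hi, hj⟩]
        · have hval : pvTget (pvTset dp i j (dpv park i j)) a b = pvTget dp a b := by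
            by_cases hai : a = i
            · subst hai
              have hbj : b ≠ j := fun hbj => hab ⟨rfl, hbj⟩
              rw [pvTget, pvTset, getD_set_eq _ _ _ _ hidp, getD_set_ne _ _ _ _ _ hbj]
              rfl
            · rw [pvTget, pvTset, getD_set_ne _ _ _ _ _ hai]; rfl
          rw [hval, htg a b]
          by_cases hc : (a < i ∨ a = i ∧ b < j) ∧ a < n ∧ b < m
          · rw [if_pos hc, if_pos (by omega)]
          · rw [if_neg hc, if_neg (by
              rintro ⟨h1 | ⟨rfl, h2⟩, h3, h4⟩
              · exact hc ⟨Or.inl h1, h3, h4⟩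
              · have : b = j ∨ b < j := by omega
                rcases this with rfl | hlt
                · exact hab ⟨rfl, rfl⟩
                · exact hc ⟨Or.inr ⟨rfl, hlt⟩, h3, h4⟩)]
  · have hfill' : ¬ pcell park i j = "-1" := hfill
    have hstep : stepA mats park i j (dp, ans) =
        (dp, if ans = 0 then -1 else ans) := by
      simp only [stepA, if_neg hfill]
    constructor
    · rw [hstep]
      refine Prod.ext rfl ?_
      rw [pstepA_unfilled mats park i j ans hfill']
    · rw [hstep]
      refine ⟨hlen, hrowlen, ?_⟩
      intro a b
      rw [htg a b]
      by_cases hab : a = i ∧ b = j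
      · obtain ⟨rfl, rfl⟩ := hab
        rw [if_neg (by omega), if_pos ⟨Or.inr ⟨rfl, by omega⟩, hi, hj⟩, dpv_zero park a b hfill']
      · by_cases hc : (a < i ∨ a = i ∧ b < j) ∧ a < n ∧ b < m
        · rw [if_pos hc, if_pos (by omega)]
        · rw [if_neg hc, if_neg (by
            rintro ⟨h1 | ⟨rfl, h2⟩, h3, h4⟩
            · exact hc ⟨Or.inl h1, h3, h4⟩
            · have : b = j ∨ b < j := by omega
              rcases this with rfl | hlt
              · exact hab ⟨rfl, rfl⟩
              · exact hc ⟨Or.inr ⟨rfl, hlt⟩, h3, h4⟩)]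

lemma InvA_row_end (park : List (List String)) (n m : Nat) (dp : List (List Int)) (i : Nat)
    (h : InvA park n m dp i m) : InvA park n m dp (i+1) 0 := by
  obtain ⟨h1, h2, h3⟩ := h
  refine ⟨h1, h2, ?_⟩
  intro a b
  rw [h3 a b]
  by_cases hc : (a < i ∨ a = i ∧ b < m) ∧ a < n ∧ b < m
  · rw [if_pos hc, if_pos (by omega)]
  · rw [if_neg hc, if_neg (by omega)]

lemma rowA_inv (mats : List Int) (park : List (List String)) (n m : Nat) :
    ∀ (k j : Nat) (dp : List (List Int)) (ans : Int) (i : Nat), i < n → j + k ≤ m →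
      InvA park n m dp i j →
      ∃ dp', (List.range' j k).foldl (fun st j' => stepA mats park i j' st) (dp, ans)
          = (dp', (List.range' j k).foldl (fun a j' => pstepA mats park i j' a) ans)
        ∧ InvA park n m dp' i (j+k) := by
  intro k
  induction k with
  | zero => intro j dp ans i _ _ hInv; exact ⟨dp, by simp, hInv⟩
  | succ k ih =>
    intro j dp ans i hi hjk hInv
    obtain ⟨heq, hInv'⟩ := stepA_inv mats park n m dp ans i j hi (by omega) hInv
    obtain ⟨dp', hfold, hInv''⟩ :=
      ih (j+1) (stepA mats park i j (dp, ans)).1 (pstepA mats park i j ans) i hi (by omega) hInv'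
    have hInvFin : InvA park n m dp' i (j + (k+1)) := by
      have e : j + (k+1) = j + 1 + k := by omega
      rw [e]; exact hInv''
    refine ⟨dp', ?_, hInvFin⟩
    rw [List.range'_succ, List.foldl_cons, List.foldl_cons, heq, hfold]

lemma outerA_inv (mats : List Int) (park : List (List String)) (n m : Nat) :
    ∀ (k i : Nat) (dp : List (List Int)) (ans : Int), i + k ≤ n →
      InvA park n m dp i 0 →
      ∃ dp', (List.range' i k).foldl (fun st i' => rowA mats park m i' st) (dp, ans)
          = (dp', (List.range' i k).foldl
              (fun a i' => (List.range m).foldl (fun a j => pstepA mats park i' j a) a) ans)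
        ∧ InvA park n m dp' (i+k) 0 := by
  intro k
  induction k with
  | zero => intro i dp ans _ hInv; exact ⟨dp, by simp, hInv⟩
  | succ k ih =>
    intro i dp ans hik hInv
    obtain ⟨dp1, hfold1, hInv1⟩ := rowA_inv mats park n m m 0 dp ans i (by omega) (by omega) hInv
    have hInv1m : InvA park n m dp1 i m := by
      simp only [Nat.zero_add] at hInv1
      exact hInv1
    have hInv1' : InvA park n m dp1 (i+1) 0 := InvA_row_end park n m dp1 i hInv1m
    obtain ⟨dp', hfold, hInv''⟩ :=
      ih (i+1) dp1 ((List.range' 0 m).foldl (fun a j => pstepA mats park i j a) ans) (by omega) hInv1'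
    have hInvFin : InvA park n m dp' (i + (k+1)) 0 := by
      have e : i + (k+1) = i + 1 + k := by omega
      rw [e]; exact hInv''
    refine ⟨dp', ?_, hInvFin⟩
    rw [List.range'_succ, List.foldl_cons, List.foldl_cons]
    have hrow : rowA mats park m i (dp, ans)
        = (dp1, (List.range' 0 m).foldl (fun a j => pstepA mats park i j a) ans) := by
      rw [rowA, List.range_eq_range']
      exact hfold1
    rw [hrow, hfold, List.range_eq_range']

-- ------- B invariants -------
def CurInv (park : List (List String)) (m : Nat) (i : Nat) (cur : List Int) (j : Nat) : Prop :=
  cur.length = m ∧ ∀ b, cur.getD b 0 = if b < j ∧ b < m then dpv park i b else 0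

def PrevInv (park : List (List String)) (m : Nat) (i : Nat) (prev : List Int) : Prop :=
  prev.length = m ∧ ∀ b, b < m → prev.getD b 0 = if i = 0 then 0 else dpv park (i-1) b

-- pure best step of B at cell (i, j)
def pstepB (park : List (List String)) (i j : Nat) (b : Int) : Int :=
  if pcell park i j = "-1" ∧ dpv park i j > b then dpv park i j else b

lemma CurInv_init (park : List (List String)) (m i : Nat) :
    CurInv park m i (List.replicate m 0) 0 := by
  refine ⟨by simp, ?_⟩
  intro b
  rw [if_neg (by omega)]
  by_cases hb : b < m
  · simp [List.getD, List.getElem?_replicate, hb]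
  · simp [List.getD, List.getElem?_replicate, hb]

lemma stepB_inv (park : List (List String)) (m : Nat) (i : Nat)
    (prev : List Int) (row : List String) (hrow : row = park.getD i [])
    (hprev : PrevInv park m i prev)
    (cur : List Int) (bb : Int) (j : Nat) (hj : j < m)
    (hcur : CurInv park m i cur j) :
    stepB prev row j (cur, bb) = ((stepB prev row j (cur, bb)).1, pstepB park i j bb) ∧
    CurInv park m i (stepB prev row j (cur, bb)).1 (j+1) := by
  obtain ⟨hclen, hcget⟩ := hcur
  obtain ⟨hplen, hpget⟩ := hprev
  by_cases hfill : row.getD j "" = "-1"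
  · have hfill' : pcell park i j = "-1" := by rw [pcell, ← hrow]; exact hfill
    have hveq : (if j = 0 then (1:Int)
        else min (min (prev.getD j 0) (cur.getD (j-1) 0)) (prev.getD (j-1) 0) + 1)
        = dpv park i j := by
      by_cases hz : j = 0
      · rw [if_pos hz, dpv_eq, if_pos hfill', if_pos (Or.inr hz)]
      · rw [if_neg hz]
        have ec : cur.getD (j-1) 0 = dpv park i (j-1) := by
          rw [hcget]; exact if_pos ⟨by omega, by omega⟩
        by_cases hi0 : i = 0
        · subst hi0
          rw [hpget j hj, hpget (j-1) (by omega), if_pos rfl, if_pos rfl, ec]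
          have h1 := dpv_nonneg park 0 (j-1)
          have hmin : min (min (0:Int) (dpv park 0 (j-1))) 0 = 0 := by
            rw [min_def, min_def]; split_ifs <;> omega
          rw [hmin, dpv_eq, if_pos hfill', if_pos (Or.inl rfl)]
          omega
        · rw [hpget j hj, hpget (j-1) (by omega), if_neg hi0, if_neg hi0, ec,
            dpv_eq park i j, if_pos hfill', if_neg (by tauto)]
    have hstep : stepB prev row j (cur, bb) =
        (cur.set j (dpv park i j), if dpv park i j > bb then dpv park i j else bb) := by
      simp only [stepB, if_pos hfill, hveq]
    constructor
    · rw [hstep]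
      refine Prod.ext rfl ?_
      simp only [pstepB, hfill', true_and]
    · rw [hstep]
      have hjc : j < cur.length := by omega
      refine ⟨by rw [List.length_set]; exact hclen, ?_⟩
      intro b
      by_cases hbj : b = j
      · subst hbj
        rw [getD_set_eq _ _ _ _ hjc, if_pos ⟨by omega, hj⟩]
      · rw [getD_set_ne _ _ _ _ _ hbj, hcget b]
        by_cases hb : b < j ∧ b < m
        · rw [if_pos hb, if_pos ⟨by omega, hb.2⟩]
        · rw [if_neg hb, if_neg (by omega)]
  · have hfill' : ¬ pcell park i j = "-1" := by rw [pcell, ← hrow]; exact hfill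
    have hstep : stepB prev row j (cur, bb) = (cur, bb) := by
      simp only [stepB, if_neg hfill]
    constructor
    · rw [hstep]
      refine Prod.ext rfl ?_
      simp only [pstepB]
      rw [if_neg (by rintro ⟨h1, _⟩; exact hfill' h1)]
    · rw [hstep]
      refine ⟨hclen, ?_⟩
      intro b
      rw [hcget b]
      by_cases hbj : b = j
      · subst hbj
        rw [if_neg (by omega), if_pos ⟨by omega, hj⟩]
        exact (dpv_zero park i b hfill').symm
      · by_cases hb : b < j ∧ b < m
        · rw [if_pos hb, if_pos ⟨by omega, hb.2⟩]
        · rw [if_neg hb, if_neg (by omega)]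

lemma rowB_inner_inv (park : List (List String)) (m : Nat) (i : Nat)
    (prev : List Int) (row : List String) (hrow : row = park.getD i [])
    (hprev : PrevInv park m i prev) :
    ∀ (k j : Nat) (cur : List Int) (bb : Int), j + k ≤ m →
      CurInv park m i cur j →
      ∃ cur', (List.range' j k).foldl (fun st2 j' => stepB prev row j' st2) (cur, bb)
          = (cur', (List.range' j k).foldl (fun b j' => pstepB park i j' b) bb)
        ∧ CurInv park m i cur' (j+k) := by
  intro k
  induction k with
  | zero => intro j cur bb _ hcur; exact ⟨cur, by simp, hcur⟩
  | succ k ih =>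
    intro j cur bb hjk hcur
    obtain ⟨heq, hcur'⟩ := stepB_inv park m i prev row hrow hprev cur bb j (by omega) hcur
    obtain ⟨cur', hfold, hcur''⟩ :=
      ih (j+1) (stepB prev row j (cur, bb)).1 (pstepB park i j bb) (by omega) hcur'
    have hFin : CurInv park m i cur' (j + (k+1)) := by
      have e : j + (k+1) = j + 1 + k := by omega
      rw [e]; exact hcur''
    refine ⟨cur', ?_, hFin⟩
    rw [List.range'_succ, List.foldl_cons, List.foldl_cons, heq, hfold]

lemma outerB_inv (park : List (List String)) (n m : Nat) (hn : n = park.length) :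
    ∀ (l : List (List String)) (i : Nat) (prev : List Int) (bb : Int),
      park.drop i = l → PrevInv park m i prev →
      (l.foldl (fun st row => rowB m row st) (prev, bb)).2
        = (List.range' i (n - i)).foldl
            (fun b i' => (List.range m).foldl (fun b j => pstepB park i' j b) b) bb := by
  intro l
  induction l with
  | nil =>
    intro i prev bb hdrop _
    have hle : park.length ≤ i := List.drop_eq_nil_iff.1 hdrop
    have h0 : n - i = 0 := by omega
    rw [h0]
    simp
  | cons row l' ih =>
    intro i prev bb hdrop hprev
    have hi : i < park.length := by
      by_contra h
      rw [List.drop_eq_nil_of_le (by omega)] at hdrop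
      exact (List.cons_ne_nil _ _) hdrop.symm
    have hrow : park.getD i [] = row := by
      have h0 : (park.drop i).head? = some row := by rw [hdrop]; rfl
      rw [List.head?_drop] at h0
      simp [List.getD, h0]
    have hdrop' : park.drop (i+1) = l' := by
      have h1 := congrArg List.tail hdrop
      simpa [List.tail_drop] using h1
    obtain ⟨cur', hfold, hcur'⟩ := rowB_inner_inv park m i prev row hrow.symm hprev m 0
      (List.replicate m 0) bb (by omega) (CurInv_init park m i)
    simp only [Nat.zero_add] at hcur'
    have hrowB : rowB m row (prev, bb)
        = (cur', (List.range' 0 m).foldl (fun b j => pstepB park i j b) bb) := by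
      rw [rowB, List.range_eq_range']
      exact hfold
    have hprev' : PrevInv park m (i+1) cur' := by
      obtain ⟨hl, hg⟩ := hcur'
      refine ⟨hl, ?_⟩
      intro b hb
      rw [hg b, if_pos ⟨hb, hb⟩, if_neg (Nat.succ_ne_zero i)]
      rfl
    have hstep : ((row :: l').foldl (fun st row => rowB m row st) (prev, bb)).2
        = (l'.foldl (fun st row => rowB m row st) (rowB m row (prev, bb))).2 := rfl
    rw [hstep, hrowB, ih (i+1) cur' _ hdrop' hprev']
    have hsplit : n - i = (n - (i+1)) + 1 := by omega
    rw [hsplit, List.range'_succ, List.foldl_cons, List.range_eq_range']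

-- max over mats of sizes achieved in the grid, as a property
def MaxProp (Q : Int → Prop) (r : Int) : Prop :=
  (r = 0 ∧ ∀ s, ¬ Q s) ∨ (Q r ∧ ∀ s, Q s → s ≤ r)

lemma MaxProp_unique (Q : Int → Prop) (r1 r2 : Int)
    (h1 : MaxProp Q r1) (h2 : MaxProp Q r2) : r1 = r2 := by
  rcases h1 with ⟨e1, n1⟩ | ⟨q1, b1⟩
  · rcases h2 with ⟨e2, _⟩ | ⟨q2, _⟩
    · omega
    · exact absurd q2 (n1 r2)
  · rcases h2 with ⟨e2, n2⟩ | ⟨q2, b2⟩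
    · exact absurd q1 (n2 r1)
    · have := b1 r2 q2; have := b2 r1 q1; omega

-- downward continuity: every side 1..k of an achieved k is achieved
lemma ach_down (park : List (List String)) (n m : Nat) :
    ∀ (t : Nat) (k : Int), k.toNat ≤ t → Ach park n m k →
      ∀ s, 1 ≤ s → s ≤ k → Ach park n m s := by
  intro t
  induction t with
  | zero =>
    intro k hk hach s hs1 hsk
    obtain ⟨i, j, hi, hj, hfill, hdp⟩ := hach
    have := dpv_pos park i j hfill
    omega
  | succ t ih =>
    intro k hk hach s hs1 hsk
    by_cases hek : s = k
    · rwa [hek]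
    · obtain ⟨i, j, hi, hj, hfill, hdp⟩ := hach
      have hk1 := dpv_pos park i j hfill
      rw [dpv_eq, if_pos hfill] at hdp
      have hz : ¬ (i = 0 ∨ j = 0) := by
        intro hz
        rw [if_pos hz] at hdp
        omega
      rw [if_neg hz] at hdp
      have hone : dpv park (i-1) j = k - 1 ∨ dpv park i (j-1) = k - 1 ∨
          dpv park (i-1) (j-1) = k - 1 := by
        rcases min_choice (min (dpv park (i-1) j) (dpv park i (j-1))) (dpv park (i-1) (j-1))
          with h | h <;>
          rcases min_choice (dpv park (i-1) j) (dpv park i (j-1)) with h' | h' <;> omega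
      have hnb : ∃ i' j', i' < n ∧ j' < m ∧ dpv park i' j' = k - 1 := by
        rcases hone with h | h | h
        · exact ⟨i-1, j, by omega, hj, h⟩
        · exact ⟨i, j-1, hi, by omega, h⟩
        · exact ⟨i-1, j-1, by omega, by omega, h⟩
      obtain ⟨i', j', hi', hj', hdp'⟩ := hnb
      have hfill' : pcell park i' j' = "-1" := filled_of_dpv_pos park i' j' (by omega)
      exact ih (k-1) (by omega) ⟨i', j', hi', hj', hfill', hdp'⟩ s hs1 (by omega)

-- step-from-0 forms and the max-form of gstepP
lemma gstepR_zero (c : Prop) [Decidable c] (v : Int) (hv : c → 1 ≤ v) :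
    gstepR c v 0 = encI (if c then max 0 v else 0) := by
  by_cases hc : c
  · have := hv hc
    simp only [gstepR, encI, hc, true_and, max_def]
    split_ifs <;> omega
  · simp [gstepR, encI, hc]

lemma gstepP_eq_max (c : Prop) [Decidable c] (v a : Int) :
    gstepP c v a = if c then max a v else a := by
  by_cases hc : c
  · simp only [gstepP, hc, true_and, if_true, max_def]
    split_ifs <;> omega
  · simp only [gstepP, hc, false_and, if_false]

lemma maxprop_mfold {α : Type} (c : α → Prop) [DecidablePred c] (f : α → Int) (L : List α)
    (hf : ∀ x ∈ L, c x → 1 ≤ f x) :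
    MaxProp (fun s => ∃ x ∈ L, c x ∧ f x = s) (mfold c f L 0) := by
  rcases mfold_cases c f L 0 with h | ⟨x, hx, hcx, hval⟩
  · left
    refine ⟨h, ?_⟩
    rintro s ⟨x, hx, hcx, rfl⟩
    have hb := mfold_bound c f L 0 x hx hcx
    have h1 := hf x hx hcx
    omega
  · right
    refine ⟨⟨x, hx, hcx, hval.symm⟩, ?_⟩
    rintro s ⟨y, hy, hcy, rfl⟩
    exact mfold_bound c f L 0 y hy hcy

lemma MaxProp_congr (Q Q' : Int → Prop) (h : ∀ s, Q s ↔ Q' s) (r : Int)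
    (hm : MaxProp Q r) : MaxProp Q' r := by
  rcases hm with ⟨h0, hn⟩ | ⟨hq, hb⟩
  · exact Or.inl ⟨h0, fun s hs => hn s ((h s).2 hs)⟩
  · exact Or.inr ⟨(h r).1 hq, fun s hs => hb s ((h s).2 hs)⟩

lemma ach_iff (park : List (List String)) (n m : Nat) (best : Int)
    (hB : MaxProp (Ach park n m) best) :
    ∀ s, Ach park n m s ↔ (1 ≤ s ∧ s ≤ best) := by
  intro s
  constructor
  · intro h
    obtain ⟨i, j, hi, hj, hf, hd⟩ := h
    have h1 := dpv_pos park i j hf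
    rcases hB with ⟨h0, hn⟩ | ⟨hq, hb⟩
    · exact absurd ⟨i, j, hi, hj, hf, hd⟩ (hn s)
    · exact ⟨by omega, hb s ⟨i, j, hi, hj, hf, hd⟩⟩
  · rintro ⟨h1, h2⟩
    rcases hB with ⟨h0, hn⟩ | ⟨hq, hb⟩
    · omega
    · exact ach_down park n m best.toNat best le_rfl hq s h1 h2

lemma foldl_const_nat {σ : Type} : ∀ (L : List Nat) (st : σ),
    L.foldl (fun st _ => st) st = st := by
  intro L
  induction L with
  | nil => intro st; rfl
  | cons x t ih => intro st; exact ih st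

-- ===== final assembly =====

theorem solution_eq_alt (mats : List Int) (park : List (List String))
    (hpre : Pre_solution mats park) : solution mats park = solution_alt mats park := by
  cases park with
  | nil => rfl
  | cons r0 rest =>
    by_cases hm0 : r0.length = 0
    · -- empty rows: both programs return 0
      have hB : solution_alt mats (r0 :: rest) = 0 := by
        simp only [solution_alt]
        rw [if_pos hm0]
      have hA : solution mats (r0 :: rest) = 0 := by
        have h0 : solution mats (r0 :: rest)
            = ((List.range (r0 :: rest).length).foldl
                (fun st i => rowA mats (r0 :: rest) r0.length i st)
                (List.replicate (r0 :: rest).length (List.replicate r0.length (0:Int)), 0)).2 := rfl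
        rw [h0, hm0]
        have hrow0 : (fun (st : List (List Int) × Int) (i : Nat) => rowA mats (r0 :: rest) 0 i st)
            = fun st _ => st := by
          funext st i
          rfl
        rw [hrow0, foldl_const_nat]
      rw [hA, hB]
    · -- main case: n ≥ 1, m ≥ 1
      set P := r0 :: rest with hP
      set n := P.length with hn
      set m := r0.length with hm
      have hn1 : 1 ≤ n := by simp [hn, hP]
      have hm1 : 1 ≤ m := by omega
      -- predicates and value function over cells
      set cA : Nat × Nat → Prop :=
        fun p => pcell P p.1 p.2 = "-1" ∧ dpv P p.1 p.2 ∈ mats with hcA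
      set cB : Nat × Nat → Prop := fun p => pcell P p.1 p.2 = "-1" with hcB
      set fv : Nat × Nat → Int := fun p => dpv P p.1 p.2 with hfv
      -- ===== A side =====
      obtain ⟨dpf, hfoldA, _⟩ := outerA_inv mats P n m n 0
        (List.replicate n (List.replicate m 0)) 0 (by omega) (InvA_init P n m)
      have hAval : solution mats P
          = (cells n m).foldl (fun a p => pstepA mats P p.1 p.2 a) 0 := by
        have h0 : solution mats P
            = ((List.range n).foldl (fun st i => rowA mats P m i st)
                (List.replicate n (List.replicate m (0:Int)), 0)).2 := rfl
        rw [h0, List.range_eq_range', hfoldA]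
        rw [cells, foldl_flatMap]
        simp only [List.foldl_map, List.range_eq_range']
      have hgsA : (fun (a : Int) (p : Nat × Nat) => pstepA mats P p.1 p.2 a)
          = fun a p => gstepR (cA p) (fv p) a := rfl
      have hcells : ((0,0) : Nat × Nat) ∈ cells n m := (mem_cells n m (0,0)).2 ⟨hn1, hm1⟩
      obtain ⟨y, L', hLdecomp⟩ := List.exists_cons_of_ne_nil (List.ne_nil_of_mem hcells)
      have hfA : ∀ p : Nat × Nat, cA p → 1 ≤ fv p := by
        rintro p ⟨h1, _⟩
        exact dpv_pos P p.1 p.2 h1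
      have hAenc : solution mats P = encI (mfold cA fv (cells n m) 0) := by
        rw [hAval, hgsA, hLdecomp]
        rw [List.foldl_cons, gstepR_zero (cA y) (fv y) (hfA y)]
        have hw : (0:Int) ≤ (if cA y then max 0 (fv y) else 0) := by
          split_ifs with h
          · exact le_max_left _ _
          · exact le_refl 0
        rw [enc_fold_renorm cA fv hfA L' _ hw]
        rfl
      -- ===== B side: best =====
      have hPrev0 : PrevInv P m 0 (List.replicate m 0) := by
        refine ⟨by simp, ?_⟩
        intro b hb
        rw [if_pos rfl]
        simp [List.getD, List.getElem?_replicate, hb]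
      have hbest0 : (P.foldl (fun st row => rowB m row st) (List.replicate m 0, 0)).2
          = mfold cB fv (cells n m) 0 := by
        have h1 := outerB_inv P n m hn P 0 (List.replicate m 0) 0 List.drop_zero hPrev0
        rw [h1]
        have h2 : n - 0 = n := Nat.sub_zero n
        rw [h2]
        rw [mfold, cells, foldl_flatMap]
        have h3 : (fun (b : Int) (p : Nat × Nat) => if cB p then max b (fv p) else b)
            = fun b p => pstepB P p.1 p.2 b := by
          funext b p
          have h4 : pstepB P p.1 p.2 b = gstepP (cB p) (fv p) b := rfl
          rw [h4, gstepP_eq_max]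
        rw [h3]
        simp only [List.foldl_map, List.range_eq_range']
      set Best := (P.foldl (fun st row => rowB m row st) (List.replicate m 0, 0)).2
        with hBestDef
      have hBval : solution_alt mats P
          = mats.foldl (fun a s => if 1 ≤ s ∧ s ≤ Best ∧ s > a then s else a) (-1) := by
        show solution_alt mats (r0 :: rest) = _
        simp only [solution_alt]
        rw [if_neg hm0]
      -- ===== MaxProp facts =====
      have hQW : MaxProp (fun s => s ∈ mats ∧ Ach P n m s) (mfold cA fv (cells n m) 0) := by
        refine MaxProp_congr _ _ ?_ _ (maxprop_mfold cA fv (cells n m) (fun x _ => hfA x))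
        intro s
        constructor
        · rintro ⟨x, hx, ⟨h1, h2⟩, rfl⟩
          obtain ⟨hxn, hxm⟩ := (mem_cells n m x).1 hx
          exact ⟨h2, x.1, x.2, hxn, hxm, h1, rfl⟩
        · rintro ⟨h1, i, j, hi, hj, hf, hd⟩
          exact ⟨(i, j), (mem_cells n m (i,j)).2 ⟨hi, hj⟩, ⟨hf, hd ▸ h1⟩, hd⟩
      have hQB : MaxProp (Ach P n m) (mfold cB fv (cells n m) 0) := by
        refine MaxProp_congr _ _ ?_ _ (maxprop_mfold cB fv (cells n m)
          (fun x _ h => dpv_pos P x.1 x.2 h))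
        intro s
        constructor
        · rintro ⟨x, hx, h1, rfl⟩
          obtain ⟨hxn, hxm⟩ := (mem_cells n m x).1 hx
          exact ⟨x.1, x.2, hxn, hxm, h1, rfl⟩
        · rintro ⟨i, j, hi, hj, hf, hd⟩
          exact ⟨(i, j), (mem_cells n m (i,j)).2 ⟨hi, hj⟩, hf, hd⟩
      have hQBest : MaxProp (Ach P n m) Best := hbest0 ▸ hQB
      have hiff := ach_iff P n m Best hQBest
      -- ===== B side: mats pass =====
      have hBenc : solution_alt mats P
          = encI (mfold (fun s => 1 ≤ s ∧ s ≤ Best) (fun s => s) mats 0) := by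
        rw [hBval]
        have h1 : (fun (a s : Int) => if 1 ≤ s ∧ s ≤ Best ∧ s > a then s else a)
            = fun a s => gstepP (1 ≤ s ∧ s ≤ Best) s a := by
          funext a s
          simp only [gstepP]
          exact if_congr (by tauto) rfl rfl
        rw [h1]
        have h2 : (-1 : Int) = encI 0 := rfl
        rw [h2, enc_fold_plain (fun s : Int => 1 ≤ s ∧ s ≤ Best) (fun s => s)
          (fun x hx => hx.1) mats 0 le_rfl]
      have hQW' : MaxProp (fun s => s ∈ mats ∧ Ach P n m s)
          (mfold (fun s => 1 ≤ s ∧ s ≤ Best) (fun s => s) mats 0) := by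
        refine MaxProp_congr _ _ ?_ _ (maxprop_mfold (fun s : Int => 1 ≤ s ∧ s ≤ Best)
          (fun s => s) mats (fun x _ hx => hx.1))
        intro s
        constructor
        · rintro ⟨x, hx, h1, rfl⟩
          exact ⟨hx, (hiff x).2 h1⟩
        · rintro ⟨h1, h2⟩
          exact ⟨s, h1, (hiff s).1 h2, rfl⟩
      -- ===== conclude =====
      have hWW := MaxProp_unique (fun s => s ∈ mats ∧ Ach P n m s) _ _ hQW hQW'
      rw [hAenc, hBenc, hWW]

-- ===== VERDICT (by name: the statement is the Claim_ definition above) =====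
theorem solution_spec : Claim_equal_solution := by
  intro mats park _ hpre
  unfold Spec_solution
  exact solution_eq_alt mats park hpre
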